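-- pv_equiv track=rewrite | github.com/sdivyanshu90/LeetCode-Solutions | easy/max_product.py | maxProduct
-- ===== SOURCE A (Python) =====
-- from typing import List
--
-- def maxProduct(nums: List[int]) -> int:
--     first_max, second_max = 0, 0
--
--     for num in nums:
--         if num > first_max:
--             second_max = first_max
--             first_max = num
--         elif num > second_max:
--             second_max = num
--
--     return (first_max - 1) * (second_max - 1)
-- ===== SOURCE B (Python) =====
-- def maxProduct(nums):
--     pool = nums + [0]
--     m1 = max(pool)
--     pool.remove(m1)
--     m2 = max(pool + [0])
--     return (m1 - 1) * (m2 - 1)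
-- ===== Notes on version B (the rewrite author's own statement) =====
-- stated objective: simpler
-- what changed: Replaces A's running (first_max, second_max) two-variable scan with a value-level computation: append a zero sentinel, take the max, remove one copy of it, take the max again, multiply the decremented pair.
import Mathlib
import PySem

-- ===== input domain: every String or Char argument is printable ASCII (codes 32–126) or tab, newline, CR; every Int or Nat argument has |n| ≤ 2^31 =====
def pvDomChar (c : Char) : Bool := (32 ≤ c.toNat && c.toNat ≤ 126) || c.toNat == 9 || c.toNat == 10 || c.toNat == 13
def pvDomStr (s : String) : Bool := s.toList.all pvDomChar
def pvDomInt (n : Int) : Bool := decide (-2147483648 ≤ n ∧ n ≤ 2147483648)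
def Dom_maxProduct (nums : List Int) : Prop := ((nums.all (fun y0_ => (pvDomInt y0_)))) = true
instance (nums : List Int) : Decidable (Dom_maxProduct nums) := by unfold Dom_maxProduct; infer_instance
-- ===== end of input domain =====

-- B replaces A's running two-max scan by max / remove-one-copy / max over the list with a zero sentinel appended; same values, alternative shape.

-- ===== PORT A =====
-- literal transliteration of A's loop: running (first_max, second_max) state, started at (0,0)
def maxProduct (nums : List Int) : Int :=
  let st := nums.foldl (fun (p : Int × Int) num =>
    if num > p.1 then (num, p.1)
    else if num > p.2 then (p.1, num)
    else p) (0, 0)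
  (st.1 - 1) * (st.2 - 1)

-- ===== PORT B =====
-- literal transliteration of Source B: pool = nums + [0]; m1 = max(pool); pool.remove(m1); m2 = max(pool + [0])
-- (pool is nonempty and m1 ∈ pool, so Python's max/remove never raise; .getD supplies the unused default)
def maxProduct_alt (nums : List Int) : Int :=
  let pool := nums ++ [0]
  let m1 := (PySem.List.max? pool (fun y => y)).getD 0
  let pool' := (PySem.List.remove? pool m1).getD []
  let m2 := (PySem.List.max? (pool' ++ [0]) (fun y => y)).getD 0
  (m1 - 1) * (m2 - 1)

-- ===== PRECONDITION & SPEC =====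
def Spec_maxProduct (nums : List Int) (out : Int) : Prop := out = maxProduct_alt nums
instance (nums : List Int) (out : Int) : Decidable (Spec_maxProduct nums out) := by unfold Spec_maxProduct; infer_instance

-- ===== CLAIM (what is proved, stated in full; the proofs are below) =====
def Claim_equal_maxProduct : Prop := ∀ (nums : List Int), Dom_maxProduct nums → Spec_maxProduct nums (maxProduct nums)

-- ===== LEMMAS AND PROOFS =====

theorem mfold_max (t : List Int) (x y : Int) :
    t.foldl max (max x y) = max x (t.foldl max y) := by
  induction t generalizing y with
  | nil => simp
  | cons a t ih =>
      simp only [List.foldl_cons, max_assoc]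
      exact ih (max y a)

theorem le_mfold (x : Int) (t : List Int) : x ≤ t.foldl max x := by
  have h := mfold_max t x x
  rw [max_self] at h
  rw [h]
  exact le_max_left _ _

theorem mem_le_mfold {a : Int} {t : List Int} (h : a ∈ t) (x : Int) :
    a ≤ t.foldl max x := by
  induction t generalizing x with
  | nil => cases h
  | cons b t ih =>
      rcases List.mem_cons.mp h with rfl | h'
      · exact le_trans (le_max_right x a) (le_mfold _ t)
      · exact ih h' (max x b)

theorem mfold_mem_or (t : List Int) (x : Int) :
    t.foldl max x = x ∨ t.foldl max x ∈ t := by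
  induction t generalizing x with
  | nil => exact Or.inl rfl
  | cons b t ih =>
      simp only [List.foldl_cons]
      rcases ih (max x b) with h | h
      · rw [h]
        rcases le_total x b with hb | hb
        · exact Or.inr (by simp [max_eq_right hb])
        · exact Or.inl (max_eq_left hb)
      · exact Or.inr (List.mem_cons_of_mem _ h)

theorem mfold_zero_of_nonpos {t : List Int} (h : ∀ a ∈ t, a ≤ 0) :
    t.foldl max 0 = 0 := by
  rcases mfold_mem_or t 0 with h0 | h0
  · exact h0
  · exact le_antisymm (h _ h0) (le_mfold 0 t)

theorem max?_getD_append_zero (l : List Int) :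
    (PySem.List.max? (l ++ [0]) (fun y => y)).getD 0 = l.foldl max 0 := by
  cases l with
  | nil => simp [PySem.List.max?_id_cons]
  | cons x t =>
      rw [List.cons_append, PySem.List.max?_id_cons, Option.getD_some,
          List.foldl_append, List.foldl_cons]
      have h1 : t.foldl max (max 0 x) = max 0 (t.foldl max x) := mfold_max t 0 x
      simp only [List.foldl_cons, List.foldl_nil]
      rw [h1, max_comm]

-- invariant of A's loop: the state is (max so far, runner-up so far), both seeded with the pair (f,s)
theorem key (l : List Int) : ∀ (f s : Int), s ≤ f →
    l.foldl (fun (p : Int × Int) num =>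
      if num > p.1 then (num, p.1)
      else if num > p.2 then (p.1, num)
      else p) (f, s)
    = (l.foldl max f, ((f :: l).erase (l.foldl max f)).foldl max s) := by
  induction l with
  | nil => intro f s _; simp
  | cons a t ih =>
      intro f s hsf
      simp only [List.foldl_cons]
      by_cases h1 : a > f
      · rw [if_pos h1]
        rw [ih a f (le_of_lt h1)]
        have hMa : max f a = a := max_eq_right (le_of_lt h1)
        rw [hMa]
        have hfM : f ≠ t.foldl max a := by
          have := le_mfold a t
          omega
        have herase : ((f :: a :: t).erase (t.foldl max a))
            = f :: ((a :: t).erase (t.foldl max a)) := by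
          rw [List.erase_cons_tail]
          simp [hfM]
        rw [herase]
        simp only [List.foldl_cons]
        rw [max_eq_right hsf]
      · rw [if_neg h1]
        rw [Int.not_lt] at h1
        have hMa : max f a = f := max_eq_left h1
        by_cases h2 : a > s
        · rw [if_pos h2]
          rw [ih f a h1, hMa]
          by_cases hMf : t.foldl max f = f
          · rw [hMf, List.erase_cons_head, List.erase_cons_head]
            simp only [List.foldl_cons]
            rw [max_eq_right (le_of_lt h2)]
          · have haM : a ≠ t.foldl max f := by
              intro hEq
              have := le_mfold f t
              omega
            have hfM : f ≠ t.foldl max f := fun h => hMf (Eq.symm h)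
            have he1 : ((f :: a :: t).erase (t.foldl max f))
                = f :: a :: (t.erase (t.foldl max f)) := by
              rw [List.erase_cons_tail, List.erase_cons_tail] <;>
                simp [haM, hfM]
            have he2 : ((f :: t).erase (t.foldl max f))
                = f :: (t.erase (t.foldl max f)) := by
              rw [List.erase_cons_tail]
              simp [hfM]
            rw [he1, he2]
            simp only [List.foldl_cons]
            have hmx : max (max s f) a = max a f := by omega
            rw [hmx, max_comm a f]
        · rw [if_neg h2]
          rw [Int.not_lt] at h2
          rw [ih f s hsf, hMa]
          by_cases hMf : t.foldl max f = f
          · rw [hMf, List.erase_cons_head, List.erase_cons_head]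
            simp only [List.foldl_cons]
            rw [max_eq_left h2]
          · have haM : a ≠ t.foldl max f := by
              intro hEq
              have := le_mfold f t
              omega
            have hfM : f ≠ t.foldl max f := fun h => hMf (Eq.symm h)
            have he1 : ((f :: a :: t).erase (t.foldl max f))
                = f :: a :: (t.erase (t.foldl max f)) := by
              rw [List.erase_cons_tail, List.erase_cons_tail] <;>
                simp [haM, hfM]
            have he2 : ((f :: t).erase (t.foldl max f))
                = f :: (t.erase (t.foldl max f)) := by
              rw [List.erase_cons_tail]
              simp [hfM]
            rw [he1, he2]
            simp only [List.foldl_cons]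
            have hmx : max (max s f) a = max s f := by omega
            rw [hmx]

-- ===== VERDICT (by name: the statement is the Claim_ definition above) =====
theorem maxProduct_spec : Claim_equal_maxProduct := by
  intro nums _
  unfold Spec_maxProduct maxProduct maxProduct_alt
  set M := nums.foldl max 0 with hMdef
  have hM0 : (0 : Int) ≤ M := le_mfold 0 nums
  -- A's state
  rw [key nums 0 0 le_rfl]
  -- B's m1
  have hm1 : (PySem.List.max? (nums ++ [0]) (fun y => y)).getD 0 = M :=
    max?_getD_append_zero nums
  -- m1 ∈ pool
  have hmem : M ∈ nums ++ [0] := by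
    rcases mfold_mem_or nums 0 with h | h
    · rw [hMdef, h]; simp
    · rw [hMdef]; exact List.mem_append_left _ h
  have hrem : (PySem.List.remove? (nums ++ [0]) M).getD []
      = (nums ++ [0]).erase M := by
    rw [PySem.List.remove?_eq_some_erase (nums ++ [0]) M hmem]; rfl
  simp only [hm1, hrem, max?_getD_append_zero]
  -- it remains to match the second maxima
  have hsec : ((0 :: nums).erase M).foldl max 0 = ((nums ++ [0]).erase M).foldl max 0 := by
    by_cases hMn : M ∈ nums
    · have hL : (nums ++ [0]).erase M = nums.erase M ++ [0] :=
        List.erase_append_left _ hMn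
      have hR : (nums.erase M ++ [0]).foldl max 0 = (nums.erase M).foldl max 0 := by
        rw [List.foldl_append]
        simp only [List.foldl_cons, List.foldl_nil]
        exact max_eq_left (le_trans (le_mfold 0 _) le_rfl)
      rw [hL, hR]
      by_cases hMz : M = 0
      · rw [hMz, List.erase_cons_head]
        have hall : ∀ a ∈ nums.erase (0 : Int), a ≤ 0 := by
          intro a ha
          have := mem_le_mfold (List.erase_subset ha) (0 : Int)
          omega
        rw [mfold_zero_of_nonpos hall, ← hMdef]
        exact hMz
      · have : (0 :: nums).erase M = 0 :: nums.erase M := by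
          rw [List.erase_cons_tail]; simp [Ne.symm hMz]
        rw [this]
        simp only [List.foldl_cons]
        simp
    · have hMz : M = 0 := by
        rcases mfold_mem_or nums 0 with h | h
        · exact h
        · exact absurd h hMn
      have hL : (nums ++ [0]).erase M = nums := by
        rw [List.erase_append_right _ hMn, hMz]
        simp
      have hR : (0 :: nums).erase M = nums := by
        rw [hMz, List.erase_cons_head]
      rw [hL, hR, ← hMdef, hMz]
  rw [hsec]
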